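-- pv_equiv track=rewrite | github.com/nlyf/text_mining_task | classifier.py | makeMask
-- ===== SOURCE A (Python) =====
-- def makeMask(lvl,dic_categories):
--   #return mask array for hierarchy level lvl based on dic_categories
--   #assume hierarchy level difference is 1
--   res=[None]*len(dic_categories.items())
--   vec_s = sorted(dic_categories.items(), key=lambda x: x[1])
--   prevtxt = ''
--   cls=0
--   for i,(k,v) in enumerate(vec_s):
--     txts = v.split('|')
--     if(len(txts)<=lvl):
--       txt = txts[lvl-1]
--     else:
--       txt = txts[lvl]
--     if(prevtxt!=txt and i>0):
--       cls+=1
--     res[i]=cls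
--     prevtxt = txt
--   return res
-- ===== SOURCE B (Python) =====
-- def makeMask(lvl, dic_categories):
--     # two-stage: sorted token list, then change-indicator diffs + running sum
--     vec_s = sorted(dic_categories.items(), key=lambda x: x[1])
--     toks = [t[lvl - 1] if len(t) <= lvl else t[lvl]
--             for t in (v.split('|') for _, v in vec_s)]
--     diffs = ([0] + [1 if a != b else 0 for a, b in zip(toks, toks[1:])]) if toks else []
--     res = []
--     s = 0
--     for d in diffs:
--         s += d
--         res.append(s)
--     return res
-- ===== Notes on version B (the rewrite author's own statement) =====
-- stated objective: alternative
-- what changed: Replaces A's single stateful loop (prevtxt/cls state machine writing into a preallocated array) with a stateless two-stage pipeline: map the sorted values to their level tokens, build a 0/1 change-indicator list by zipping the token list with its own tail, and prefix-sum it.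
import Mathlib
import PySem

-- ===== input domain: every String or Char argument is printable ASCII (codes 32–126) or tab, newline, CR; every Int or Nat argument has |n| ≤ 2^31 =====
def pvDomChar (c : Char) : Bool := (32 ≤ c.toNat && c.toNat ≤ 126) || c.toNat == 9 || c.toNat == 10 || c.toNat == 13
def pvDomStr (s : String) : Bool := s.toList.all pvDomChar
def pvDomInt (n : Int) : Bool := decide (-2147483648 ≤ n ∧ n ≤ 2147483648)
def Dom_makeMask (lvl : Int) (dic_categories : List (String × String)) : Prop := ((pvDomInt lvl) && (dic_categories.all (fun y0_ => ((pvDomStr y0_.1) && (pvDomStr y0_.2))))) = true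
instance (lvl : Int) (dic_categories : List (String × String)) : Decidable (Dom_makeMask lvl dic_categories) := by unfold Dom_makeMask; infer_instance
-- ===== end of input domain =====

-- B replaces A's stateful prev/cls loop by a token map, a 0/1 change-indicator list and a
-- running prefix sum (objective: alternative decomposition, same cost).

-- ===== PORT A =====
-- A's for-loop as the obvious structural recursion over the sorted pairs, carrying the
-- enumeration index i, prevtxt, cls and the filled prefix of res (res[i]=cls in order = append).
def makeMaskLoop (lvl : Int) : List (String × String) → Int → String → Int → List Int → List Int
  | [], _, _, _, res => res
  | (_, v) :: rest, i, prevtxt, cls, res =>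
      let txts := ((PySem.Str.split? v "|").getD [])
      let txt := if (txts.length : Int) ≤ lvl then PySem.List.pyGetD txts (lvl - 1) ""
                 else PySem.List.pyGetD txts lvl ""
      let cls' := if prevtxt ≠ txt ∧ i > 0 then cls + 1 else cls
      makeMaskLoop lvl rest (i + 1) txt cls' (res ++ [cls'])

def makeMask (lvl : Int) (dic_categories : List (String × String)) : List Int :=
  let vec_s := PySem.List.sorted dic_categories (fun x => x.2)
  makeMaskLoop lvl vec_s 0 "" 0 []

-- ===== PORT B =====
-- the token of value v at level lvl (Source B's comprehension body; pyGetD is exact under Pre_)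
def pvToken (lvl : Int) (v : String) : String :=
  let t := ((PySem.Str.split? v "|").getD [])
  if (t.length : Int) ≤ lvl then PySem.List.pyGetD t (lvl - 1) ""
  else PySem.List.pyGetD t lvl ""

def makeMask_alt (lvl : Int) (dic_categories : List (String × String)) : List Int :=
  let vec_s := PySem.List.sorted dic_categories (fun x => x.2)
  let toks := vec_s.map (fun p => pvToken lvl p.2)
  -- zip(toks, toks[1:]): toks[1:] with nonnegative start is toks.drop 1
  let diffs : List Int :=
    if toks ≠ [] then
      (0 : Int) :: (toks.zip (toks.drop 1)).map (fun p => if p.1 ≠ p.2 then (1 : Int) else 0)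
    else []
  (diffs.foldl (fun st d => (st.1 + d, st.2 ++ [st.1 + d])) ((0 : Int), ([] : List Int))).2

-- ===== PRECONDITION & SPEC =====
-- Pre_ excludes exactly the inputs where Python A raises IndexError: some value's chosen
-- token index (lvl-1 when len(txts) <= lvl, else lvl, Python negative indexing allowed)
-- is out of range for its split list.
def Pre_makeMask (lvl : Int) (dic_categories : List (String × String)) : Prop :=
  ∀ p ∈ dic_categories,
    (if ((((PySem.Str.split? p.2 "|").getD [])).length : Int) ≤ lvl
     then PySem.Raise.InRange (((PySem.Str.split? p.2 "|").getD [])).length (lvl - 1)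
     else PySem.Raise.InRange (((PySem.Str.split? p.2 "|").getD [])).length lvl)
instance (lvl : Int) (dic_categories : List (String × String)) : Decidable (Pre_makeMask lvl dic_categories) := by unfold Pre_makeMask; infer_instance

def pvWitness_makeMask : Int × (List (String × String)) := (1, [("a", "x|y"), ("b", "x|z")])

def Spec_makeMask (lvl : Int) (dic_categories : List (String × String)) (out : List Int) : Prop := out = makeMask_alt lvl dic_categories
instance (lvl : Int) (dic_categories : List (String × String)) (out : List Int) : Decidable (Spec_makeMask lvl dic_categories out) := by unfold Spec_makeMask; infer_instance

-- ===== CLAIM (what is proved, stated in full; the proofs are below) =====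
def Claim_equal_makeMask : Prop := ∀ (lvl : Int) (dic_categories : List (String × String)), Dom_makeMask lvl dic_categories → Pre_makeMask lvl dic_categories → Spec_makeMask lvl dic_categories (makeMask lvl dic_categories)

-- ===== LEMMAS AND PROOFS =====

-- the change-indicator list of a token list relative to a previous token
def pvMkdiffs : String → List String → List Int
  | _, [] => []
  | p, t :: ts => (if p ≠ t then (1 : Int) else 0) :: pvMkdiffs t ts

theorem pvZip_eq_mkdiffs (ts : List String) : ∀ (t0 : String),
    ((t0 :: ts).zip ts).map (fun p => if p.1 = p.2 then (0 : Int) else 1) = pvMkdiffs t0 ts := by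
  induction ts with
  | nil => intro t0; simp [pvMkdiffs]
  | cons t ts ih => intro t0; simp only [List.zip_cons_cons, List.map_cons, ih t, pvMkdiffs, ne_eq, ite_not]

theorem pvTxt_eq (lvl : Int) (v : String) :
    (if ((((PySem.Str.split? v "|").getD []) : List String).length : Int) ≤ lvl
     then PySem.List.pyGetD ((PySem.Str.split? v "|").getD []) (lvl - 1) ""
     else PySem.List.pyGetD ((PySem.Str.split? v "|").getD []) lvl "") = pvToken lvl v := rfl

theorem pvLoop_eq_fold (lvl : Int) (ps : List (String × String)) : ∀ (i : Int), 0 < i →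
    ∀ (prev : String) (cls : Int) (res : List Int),
    makeMaskLoop lvl ps i prev cls res =
      ((pvMkdiffs prev (ps.map (fun p => pvToken lvl p.2))).foldl
        (fun st d => (st.1 + d, st.2 ++ [st.1 + d])) (cls, res)).2 := by
  induction ps with
  | nil => intro i _ prev cls res; simp [makeMaskLoop, pvMkdiffs]
  | cons p rest ih =>
      intro i hi prev cls res
      obtain ⟨k, v⟩ := p
      simp only [makeMaskLoop, List.map_cons, pvMkdiffs, List.foldl_cons]
      rw [ih (i + 1) (by omega)]
      simp only [pvTxt_eq]
      by_cases h : prev = pvToken lvl v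
      · simp [h]
      · simp [h, hi]

theorem makeMask_eq_alt (lvl : Int) (dic_categories : List (String × String)) :
    makeMask lvl dic_categories = makeMask_alt lvl dic_categories := by
  unfold makeMask makeMask_alt
  cases hs : PySem.List.sorted dic_categories (fun x => x.2) with
  | nil => simp [makeMaskLoop]
  | cons p rest =>
      obtain ⟨k, v⟩ := p
      simp only [makeMaskLoop, List.map_cons, ne_eq, reduceCtorEq, not_false_eq_true, if_true,
        List.drop_one, List.tail_cons, List.foldl_cons]
      simp only [pvTxt_eq]
      norm_num
      rw [pvZip_eq_mkdiffs (rest.map (fun p => pvToken lvl p.2)) (pvToken lvl v),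
        pvLoop_eq_fold lvl rest 1 (by omega)]
-- ===== VERDICT (by name: the statement is the Claim_ definition above) =====
theorem makeMask_spec : Claim_equal_makeMask := by
  intro lvl dic _ _
  unfold Spec_makeMask
  exact makeMask_eq_alt lvl dic
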